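-- pv_equiv track=rewrite | github.com/Social-Network-Algorithms/Community-Detection-Algo | src/process/community_expansion/clustering_helper.py | remove_unconnected_nodes
-- ===== SOURCE A (Python) =====
-- def remove_unconnected_nodes(user_dict):
--     count = 1
--     while count > 0:
--         count = 0
--         keys = list(user_dict.keys())
--         for user in keys:
--             if len(user_dict[user]) == 0:
--                 count += 1
--                 del user_dict[user]
--                 for key in user_dict.keys():
--                     if user in user_dict[key]:
--                         user_dict[key].remove(user)
--
--     user_list = list(user_dict.keys())
--
--     return user_list
-- ===== SOURCE B (Python) =====
-- def remove_unconnected_nodes(user_dict):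
--     # Queue-based peeling with a reverse index; does not mutate user_dict
--     # (A empties the removed entries in place; only the return value is claimed equal).
--     deg = {}
--     rev = {}
--     for user, adj in user_dict.items():
--         deg[user] = len(adj)
--         for v in set(adj):
--             rev.setdefault(v, []).append(user)
--     stack = [u for u in user_dict if deg[u] == 0]
--     removed = set(stack)
--     while stack:
--         u = stack.pop()
--         for k in rev.get(u, []):
--             if k not in removed:
--                 deg[k] -= 1
--                 if deg[k] == 0:
--                     removed.add(k)
--                     stack.append(k)
--     return [u for u in user_dict if u not in removed]
-- ===== Notes on version B (the rewrite author's own statement) =====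
-- stated objective: alternative
-- what changed: Replaces A's repeated full-dict rescans (rounds that rescan every key and every adjacency list after each deletion) with a single queue-based peel: degrees and a reverse index are built once and only the reverse-index neighbours of a removed node are decremented; B also does not mutate user_dict, only the return value is matched.
import Mathlib
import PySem

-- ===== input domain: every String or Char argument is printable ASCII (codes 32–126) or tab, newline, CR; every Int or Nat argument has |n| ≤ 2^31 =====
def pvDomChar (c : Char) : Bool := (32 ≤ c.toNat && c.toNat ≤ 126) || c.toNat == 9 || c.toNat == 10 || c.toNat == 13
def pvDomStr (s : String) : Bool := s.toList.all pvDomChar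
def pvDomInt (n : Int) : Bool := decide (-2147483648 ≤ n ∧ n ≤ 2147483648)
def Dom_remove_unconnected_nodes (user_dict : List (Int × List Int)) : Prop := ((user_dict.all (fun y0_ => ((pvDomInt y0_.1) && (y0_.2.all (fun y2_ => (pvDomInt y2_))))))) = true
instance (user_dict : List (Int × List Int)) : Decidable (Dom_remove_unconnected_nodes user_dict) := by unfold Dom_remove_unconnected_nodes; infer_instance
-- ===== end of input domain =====

-- B replaces A's repeated full rescans of the dict by a single queue-based peel over a
-- precomputed reverse index (a different algorithm, not measured faster on the random inputs);
-- A empties the removed entries of user_dict in place, B does not mutate it — only the RETURN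
-- value is claimed equal.

-- ===== PORT A =====
-- A, transliterated.  The while-loop runs at most (number of keys)+1 rounds (every round but the
-- last deletes at least one key), so it is driven by that much fuel.  `user_dict[user]` /
-- `user_dict[key]` are ported as getD with default []: the keys are always present (a key is
-- deleted only when it is the current `user` of the round), so the default is never consulted.
def pvInnerStepA (user : Int) (d : PySem.Dict Int (List Int)) (key : Int) : PySem.Dict Int (List Int) :=
  if user ∈ PySem.Dict.getD d key [] then
    PySem.Dict.insert d key ((PySem.Dict.getD d key []).erase user)  -- user_dict[key].remove(user)
  else d

-- the inner 'for key in user_dict.keys(): …' after 'del user_dict[user]'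
def pvInnerA (d : PySem.Dict Int (List Int)) (user : Int) : PySem.Dict Int (List Int) :=
  (PySem.Dict.keys d).foldl (pvInnerStepA user) d

def pvRoundStepA (cd : Nat × PySem.Dict Int (List Int)) (user : Int) : Nat × PySem.Dict Int (List Int) :=
  if (PySem.Dict.getD cd.2 user []).length == 0 then
    (cd.1 + 1, pvInnerA (PySem.Dict.erase cd.2 user) user)
  else cd

-- one pass of 'for user in keys: …' (keys snapshot taken at round start), returning (count, dict)
def pvRoundA (d : PySem.Dict Int (List Int)) : Nat × PySem.Dict Int (List Int) :=
  (PySem.Dict.keys d).foldl pvRoundStepA (0, d)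

def pvLoopA : Nat → PySem.Dict Int (List Int) → PySem.Dict Int (List Int)
  | 0, d => d
  | fuel + 1, d =>
    let cd := pvRoundA d
    if cd.1 > 0 then pvLoopA fuel cd.2 else cd.2

def remove_unconnected_nodes (user_dict : List (Int × List Int)) : List Int :=
  PySem.Dict.keys (pvLoopA (user_dict.length + 1) (PySem.Dict.mk user_dict))

-- ===== PORT B =====
-- B, transliterated.  The Python stack (append/pop at the right end) is kept with its top at the
-- HEAD of the list, so the initial stack is the seed list reversed.
def pvRevStepB (user : Int) (rev : PySem.Dict Int (List Int)) (v : Int) : PySem.Dict Int (List Int) :=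
  PySem.Dict.insert rev v (PySem.Dict.getD rev v [] ++ [user])  -- rev.setdefault(v, []).append(user)

def pvInitStepB (dr : PySem.Dict Int Int × PySem.Dict Int (List Int)) (p : Int × List Int) :
    PySem.Dict Int Int × PySem.Dict Int (List Int) :=
  (PySem.Dict.insert dr.1 p.1 (p.2.length : Int),
   (PySem.Set.ofList p.2).foldl (pvRevStepB p.1) dr.2)

-- 'for user, adj in user_dict.items(): deg[user] = len(adj); for v in set(adj): …'
def pvInitB (user_dict : List (Int × List Int)) : PySem.Dict Int Int × PySem.Dict Int (List Int) :=
  user_dict.foldl pvInitStepB (PySem.Dict.mk [], PySem.Dict.mk [])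

-- body of 'for k in rev.get(u, []): …'; state = (deg, stack, removed)
def pvPeelStepB (s : PySem.Dict Int Int × List Int × PySem.Set Int) (k : Int) :
    PySem.Dict Int Int × List Int × PySem.Set Int :=
  if s.2.2.contains k then s
  else
    let deg' := PySem.Dict.modify s.1 k 0 (· - 1)  -- deg[k] -= 1
    if PySem.Dict.getD deg' k 0 == 0 then (deg', k :: s.2.1, PySem.Set.add s.2.2 k)
    else (deg', s.2.1, s.2.2)

-- 'while stack: u = stack.pop(); …'.  Each key is pushed at most once, so at most
-- (number of keys) iterations happen; the fuel covers that.
def pvPeelB : Nat → PySem.Dict Int Int → PySem.Dict Int (List Int) → List Int → PySem.Set Int → PySem.Set Int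
  | 0, _, _, _, removed => removed
  | _ + 1, _, _, [], removed => removed
  | fuel + 1, deg, rev, u :: stack, removed =>
    let st := (PySem.Dict.getD rev u []).foldl pvPeelStepB (deg, stack, removed)
    pvPeelB fuel st.1 rev st.2.1 st.2.2

def remove_unconnected_nodes_alt (user_dict : List (Int × List Int)) : List Int :=
  let dr := pvInitB user_dict
  let ks := user_dict.map Prod.fst
  let seeds := ks.filter (fun u => PySem.Dict.getD dr.1 u 0 == 0)  -- [u for u in user_dict if deg[u] == 0]
  let removed := pvPeelB (user_dict.length + 1) dr.1 dr.2 seeds.reverse (PySem.Set.ofList seeds)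
  ks.filter (fun u => !(removed.contains u))  -- [u for u in user_dict if u not in removed]

-- ===== PRECONDITION & SPEC =====
-- Pre_ excludes only association lists with duplicate keys: they do not represent any Python
-- dict (A's parameter is a dict, whose keys are necessarily distinct), so A is never run on them.
def Pre_remove_unconnected_nodes (user_dict : List (Int × List Int)) : Prop :=
  (user_dict.map Prod.fst).Nodup

instance (user_dict : List (Int × List Int)) : Decidable (Pre_remove_unconnected_nodes user_dict) := by
  unfold Pre_remove_unconnected_nodes; infer_instance

def pvWitness_remove_unconnected_nodes : (List (Int × List Int)) := [(1, [2]), (2, [1]), (3, [])]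

def Spec_remove_unconnected_nodes (user_dict : List (Int × List Int)) (out : List Int) : Prop :=
  out = remove_unconnected_nodes_alt user_dict
instance (user_dict : List (Int × List Int)) (out : List Int) : Decidable (Spec_remove_unconnected_nodes user_dict out) := by
  unfold Spec_remove_unconnected_nodes; infer_instance

-- ===== CLAIM (what is proved, stated in full; the proofs are below) =====
def Claim_equal_remove_unconnected_nodes : Prop := ∀ (user_dict : List (Int × List Int)), Dom_remove_unconnected_nodes user_dict → Pre_remove_unconnected_nodes user_dict → Spec_remove_unconnected_nodes user_dict (remove_unconnected_nodes user_dict)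

-- ===== LEMMAS AND PROOFS =====

-- ---- the abstract peeling process both programs implement ----

-- adjacency list of k in the original input (first match, like the Python dict)
def adjD (dl : List (Int × List Int)) (k : Int) : List Int :=
  PySem.Dict.getD (PySem.Dict.mk dl) k []

-- current degree of k once the nodes of R have been peeled (one occurrence removed per peeled node)
def degA (dl : List (Int × List Int)) (R : List Int) (k : Int) : Int :=
  ((adjD dl k).length : Int) - (R.countP (fun v => decide (v ∈ adjD dl k)) : Nat)

-- R is a legal peeling sequence continuing the already-peeled prefix `pre`
def PeelFrom (dl : List (Int × List Int)) : List Int → List Int → Prop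
  | _, [] => True
  | pre, x :: R => x ∈ dl.map Prod.fst ∧ x ∉ pre ∧ degA dl pre x = 0 ∧ PeelFrom dl (pre ++ [x]) R

-- no further node can be peeled after R
def ClosedA (dl : List (Int × List Int)) (R : List Int) : Prop :=
  ∀ k ∈ dl.map Prod.fst, k ∉ R → degA dl R k ≠ 0

lemma countP_mono_of_subset {R S : List Int} (p : Int → Bool) (hR : R.Nodup)
    (hsub : ∀ x ∈ R, x ∈ S) : R.countP p ≤ S.countP p := by
  rw [List.countP_eq_length_filter, List.countP_eq_length_filter]
  exact List.Subperm.length_le (List.Nodup.subperm (hR.filter p)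
    (fun x hx => by
      simp only [List.mem_filter] at hx ⊢
      exact ⟨hsub x hx.1, hx.2⟩))

lemma countP_mem_le {P : List Int} (l : List Int) (hP : P.Nodup) :
    P.countP (fun v => decide (v ∈ l)) ≤ l.length := by
  rw [List.countP_eq_length_filter]
  refine List.Subperm.length_le (List.Nodup.subperm (hP.filter _) ?_)
  intro x hx
  simp only [List.mem_filter, decide_eq_true_eq] at hx
  exact hx.2

lemma degA_nonneg (dl : List (Int × List Int)) {R : List Int} (k : Int) (hR : R.Nodup) :
    0 ≤ degA dl R k := by
  unfold degA
  have h := countP_mem_le (adjD dl k) hR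
  omega

lemma degA_mono (dl : List (Int × List Int)) {R S : List Int} (k : Int) (hR : R.Nodup)
    (hsub : ∀ x ∈ R, x ∈ S) : degA dl S k ≤ degA dl R k := by
  unfold degA
  have h := countP_mono_of_subset (S := S) (fun v => decide (v ∈ adjD dl k)) hR hsub
  omega

lemma degA_congr (dl : List (Int × List Int)) {R S : List Int} (k : Int) (hR : R.Nodup)
    (hS : S.Nodup) (h : ∀ x, x ∈ R ↔ x ∈ S) : degA dl R k = degA dl S k := by
  have h1 := countP_mono_of_subset (S := S) (fun v => decide (v ∈ adjD dl k)) hR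
    (fun x hx => (h x).mp hx)
  have h2 := countP_mono_of_subset (S := R) (fun v => decide (v ∈ adjD dl k)) hS
    (fun x hx => (h x).mpr hx)
  unfold degA
  omega

lemma peelFrom_subset (dl : List (Int × List Int)) :
    ∀ (R pre : List Int), PeelFrom dl pre R → ∀ x ∈ R, x ∈ dl.map Prod.fst := by
  intro R
  induction R with
  | nil => intro pre _ x hx; simp at hx
  | cons y R ih =>
    intro pre h x hx
    simp only [PeelFrom] at h
    obtain ⟨hyK, _, _, ht⟩ := h
    rcases List.mem_cons.mp hx with rfl | hx'
    · exact hyK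
    · exact ih _ ht x hx'

lemma peelFrom_nodup (dl : List (Int × List Int)) :
    ∀ (R pre : List Int), PeelFrom dl pre R → pre.Nodup → (pre ++ R).Nodup := by
  intro R
  induction R with
  | nil => intro pre _ hpre; simpa using hpre
  | cons y R ih =>
    intro pre h hpre
    simp only [PeelFrom] at h
    obtain ⟨_, hy, _, ht⟩ := h
    have hpre' : (pre ++ [y]).Nodup := by
      rw [List.nodup_append]
      refine ⟨hpre, List.nodup_singleton y, ?_⟩
      intro a ha b hb e
      have hb' : b = y := by simpa using hb
      exact hy ((e.trans hb') ▸ ha)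
    have := ih (pre ++ [y]) ht hpre'
    simpa [List.append_assoc] using this

lemma peel_nodup (dl : List (Int × List Int)) {R : List Int} (h : PeelFrom dl [] R) : R.Nodup := by
  simpa using peelFrom_nodup dl R [] h List.nodup_nil

lemma peelFrom_snoc (dl : List (Int × List Int)) {x : Int} :
    ∀ (R pre : List Int), PeelFrom dl pre R → x ∈ dl.map Prod.fst → x ∉ pre ++ R →
      degA dl (pre ++ R) x = 0 → PeelFrom dl pre (R ++ [x]) := by
  intro R
  induction R with
  | nil =>
    intro pre _ hK hni hdeg
    simp only [List.append_nil] at hni hdeg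
    simp only [List.nil_append, PeelFrom]
    exact ⟨hK, hni, hdeg, trivial⟩
  | cons y R ih =>
    intro pre h hK hni hdeg
    simp only [PeelFrom] at h
    obtain ⟨h1, h2, h3, h4⟩ := h
    have e : pre ++ [y] ++ R = pre ++ y :: R := by simp
    simp only [List.cons_append, PeelFrom]
    refine ⟨h1, h2, h3, ih (pre ++ [y]) h4 hK ?_ ?_⟩
    · rw [e]; exact hni
    · rw [e]; exact hdeg

-- a legal peel is contained in every closed nodup set
lemma peel_subset_closed (dl : List (Int × List Int)) {S : List Int} (hS : S.Nodup)
    (hcl : ClosedA dl S) :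
    ∀ (R pre : List Int), PeelFrom dl pre R → pre.Nodup → (∀ x ∈ pre, x ∈ S) →
      ∀ x ∈ R, x ∈ S := by
  intro R
  induction R with
  | nil => intro pre _ _ _ x hx; simp at hx
  | cons y R ih =>
    intro pre h hpre hpresub x hx
    simp only [PeelFrom] at h
    obtain ⟨hyK, hypre, hydeg, ht⟩ := h
    have hyS : y ∈ S := by
      by_contra hyS
      have h0 : degA dl S y ≤ degA dl pre y := degA_mono dl y hpre hpresub
      have h1 : 0 ≤ degA dl S y := degA_nonneg dl y hS
      exact hcl y hyK hyS (by omega)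
    have hpre' : (pre ++ [y]).Nodup := by
      rw [List.nodup_append]
      refine ⟨hpre, List.nodup_singleton y, ?_⟩
      intro a ha b hb e
      have hb' : b = y := by simpa using hb
      exact hypre ((e.trans hb') ▸ ha)
    have hsub' : ∀ z ∈ pre ++ [y], z ∈ S := by
      intro z hz
      rcases List.mem_append.mp hz with hz' | hz'
      · exact hpresub z hz'
      · simp at hz'; subst hz'; exact hyS
    rcases List.mem_cons.mp hx with rfl | hx'
    · exact hyS
    · exact ih (pre ++ [y]) ht hpre' hsub' x hx'

-- ---- A: the dict state after peeling R is `strip dl R R` ----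

-- entries of dl whose key is not in Q, each value with one occurrence of every peeled node erased
def strip (dl : List (Int × List Int)) (R Q : List Int) : List (Int × List Int) :=
  (dl.filter (fun p => !decide (p.1 ∈ Q))).map (fun p => (p.1, R.foldl (fun acc v => acc.erase v) p.2))

lemma foldl_erase_nil : ∀ (R : List Int), R.foldl (fun acc v => acc.erase v) [] = [] := by
  intro R
  induction R with
  | nil => rfl
  | cons v R ih => simpa using ih

lemma getD_mk_cons (a : Int) (x : List Int) (tl : List (Int × List Int)) (k : Int) :
    PySem.Dict.getD (PySem.Dict.mk ((a, x) :: tl)) k [] =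
      if a = k then x else PySem.Dict.getD (PySem.Dict.mk tl) k [] := by
  rw [PySem.Dict.getD, PySem.Dict.get?_mk_cons]
  by_cases h : a = k
  · simp [h]
  · simp [h, PySem.Dict.getD]

lemma strip_cons (a : Int) (x : List Int) (tl : List (Int × List Int)) (R Q : List Int) :
    strip ((a, x) :: tl) R Q =
      if a ∈ Q then strip tl R Q
      else (a, R.foldl (fun acc v => acc.erase v) x) :: strip tl R Q := by
  by_cases h : a ∈ Q
  · simp [strip, h]
  · simp [strip, h]

lemma map_fst_filter_key {β : Type} (l : List (Int × β)) (q : Int → Bool) :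
    (l.filter (fun p => q p.1)).map Prod.fst = (l.map Prod.fst).filter q := by
  induction l with
  | nil => rfl
  | cons a tl ih =>
    by_cases h : q a.1
    · simp [h, ih]
    · simp [h, ih]

lemma keys_strip (dl : List (Int × List Int)) (R Q : List Int) :
    PySem.Dict.keys (PySem.Dict.mk (strip dl R Q)) =
      (dl.map Prod.fst).filter (fun k => !decide (k ∈ Q)) := by
  show ((dl.filter (fun p => !decide (p.1 ∈ Q))).map
      (fun p => (p.1, R.foldl (fun acc v => acc.erase v) p.2))).map (fun x => x.1) = _
  rw [List.map_map]
  have he : ((fun (x : Int × List Int) => x.1) ∘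
      fun (p : Int × List Int) => (p.1, R.foldl (fun acc v => acc.erase v) p.2)) =
      (Prod.fst : Int × List Int → Int) := by
    funext p; rfl
  rw [he]
  exact map_fst_filter_key dl (fun k => !decide (k ∈ Q))

lemma adjD_cons (a : Int) (x : List Int) (tl : List (Int × List Int)) (k : Int) :
    adjD ((a, x) :: tl) k = if a = k then x else adjD tl k := by
  exact getD_mk_cons a x tl k

lemma getD_strip (dl : List (Int × List Int)) (R Q : List Int) (k : Int) (hk : k ∉ Q) :
    PySem.Dict.getD (PySem.Dict.mk (strip dl R Q)) k [] =
      R.foldl (fun acc v => acc.erase v) (adjD dl k) := by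
  induction dl with
  | nil =>
    show PySem.Dict.getD (PySem.Dict.mk (strip [] R Q)) k [] = R.foldl _ (adjD [] k)
    have h1 : strip [] R Q = [] := rfl
    have h2 : adjD ([] : List (Int × List Int)) k = [] := rfl
    rw [h1, h2, foldl_erase_nil]
    rfl
  | cons p tl ih =>
    obtain ⟨a, x⟩ := p
    rw [adjD_cons]
    by_cases haQ : a ∈ Q
    · have hak : ¬ a = k := fun e => hk (e ▸ haQ)
      rw [strip_cons, if_pos haQ, if_neg hak]
      exact ih
    · rw [strip_cons, if_neg haQ]
      by_cases hak : a = k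
      · rw [if_pos hak, getD_mk_cons, if_pos hak]
      · rw [if_neg hak, getD_mk_cons, if_neg hak]
        exact ih

lemma length_foldl_erase : ∀ (R l : List Int), R.Nodup →
    (R.foldl (fun acc v => acc.erase v) l).length = l.length - R.countP (fun v => decide (v ∈ l)) := by
  intro R
  induction R with
  | nil => intro l _; simp
  | cons v R ih =>
    intro l h
    have hv : v ∉ R := (List.nodup_cons.mp h).1
    have hR : R.Nodup := (List.nodup_cons.mp h).2
    simp only [List.foldl_cons]
    rw [ih (l.erase v) hR]
    have hc : R.countP (fun w => decide (w ∈ l.erase v)) = R.countP (fun w => decide (w ∈ l)) := by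
      apply List.countP_congr
      intro a ha
      have hav : a ≠ v := fun e => hv (e ▸ ha)
      simp [List.mem_erase_of_ne hav]
    rw [hc, List.length_erase, List.countP_cons]
    have hle := countP_mem_le (P := R) l hR
    by_cases hvl : v ∈ l
    · simp only [hvl, if_true, decide_true]
      omega
    · rw [if_neg hvl, if_neg (by simp [hvl])]
      omega

lemma erase_strip (dl : List (Int × List Int)) (R Q : List Int) (u : Int) :
    PySem.Dict.erase (PySem.Dict.mk (strip dl R Q)) u = PySem.Dict.mk (strip dl R (Q ++ [u])) := by
  apply PySem.Dict.ext
  show (strip dl R Q).filter (fun p => !(p.1 == u)) = strip dl R (Q ++ [u])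
  induction dl with
  | nil => rfl
  | cons p tl ih =>
    obtain ⟨a, x⟩ := p
    rw [strip_cons, strip_cons]
    by_cases haQ : a ∈ Q
    · rw [if_pos haQ, if_pos (by simp [haQ])]
      exact ih
    · by_cases hau : a = u
      · rw [if_neg haQ, if_pos (by simp [hau])]
        rw [List.filter_cons, if_neg (by simp [hau])]
        exact ih
      · rw [if_neg haQ, if_neg (by simp [haQ, hau])]
        rw [List.filter_cons, if_pos (by simp [hau])]
        rw [ih]

-- one inner-loop step on an assoc list with distinct keys edits the one matching entry
lemma innerStepA_mk (u k₀ : Int) (l : List (Int × List Int)) (hl : (l.map Prod.fst).Nodup) :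
    pvInnerStepA u (PySem.Dict.mk l) k₀ =
      PySem.Dict.mk (l.map (fun p => if p.1 = k₀ then (p.1, p.2.erase u) else p)) := by
  by_cases hk : k₀ ∈ l.map Prod.fst
  · obtain ⟨p0, hp0, hfst⟩ := List.mem_map.mp hk
    have hget : PySem.Dict.get? (PySem.Dict.mk l) k₀ = some p0.2 := by
      apply PySem.Dict.get?_of_mem_items
      · show (k₀, p0.2) ∈ l
        rw [← hfst]
        exact hp0
      · exact hl
    have hgetD : PySem.Dict.getD (PySem.Dict.mk l) k₀ [] = p0.2 := by
      simp [PySem.Dict.getD, hget]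
    have hval : ∀ p ∈ l, p.1 = k₀ → p.2 = p0.2 := by
      intro p hp hpk
      have h2 : PySem.Dict.get? (PySem.Dict.mk l) k₀ = some p.2 := by
        apply PySem.Dict.get?_of_mem_items
        · show (k₀, p.2) ∈ l
          rw [← hpk]
          exact hp
        · exact hl
      rw [hget] at h2
      exact (Option.some_inj.mp h2).symm
    unfold pvInnerStepA
    rw [hgetD]
    by_cases hu : u ∈ p0.2
    · rw [if_pos hu]
      have hcont : (PySem.Dict.mk l).contains k₀ = true := by
        simp only [PySem.Dict.contains, List.any_eq_true]
        exact ⟨p0, hp0, by simp [hfst]⟩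
      apply PySem.Dict.ext
      simp only [PySem.Dict.insert, hcont, if_true]
      apply List.map_congr_left
      intro p hp
      by_cases hpk : p.1 = k₀
      · simp [hpk, hval p hp hpk]
      · simp [hpk]
    · rw [if_neg hu]
      apply PySem.Dict.ext
      have hid : ∀ p ∈ l, (if p.1 = k₀ then (p.1, p.2.erase u) else p) = p := by
        intro p hp
        by_cases hpk : p.1 = k₀
        · have h22 : p.2.erase u = p.2 := by
            rw [hval p hp hpk]
            exact List.erase_of_not_mem hu
          rw [if_pos hpk, h22]
        · rw [if_neg hpk]
      exact ((List.map_congr_left hid).trans (List.map_id l)).symm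
  · have hfind : l.find? (fun p => p.1 == k₀) = none := by
      rw [List.find?_eq_none]
      intro p hp
      simp only [beq_iff_eq]
      exact fun e => hk (List.mem_map.mpr ⟨p, hp, e⟩)
    have hgetD : PySem.Dict.getD (PySem.Dict.mk l) k₀ [] = [] := by
      simp [PySem.Dict.getD, PySem.Dict.get?, hfind]
    unfold pvInnerStepA
    rw [hgetD, if_neg (by simp)]
    apply PySem.Dict.ext
    have hid : ∀ p ∈ l, (if p.1 = k₀ then (p.1, p.2.erase u) else p) = p := by
      intro p hp
      exact if_neg (fun e => hk (List.mem_map.mpr ⟨p, hp, e⟩))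
    exact ((List.map_congr_left hid).trans (List.map_id l)).symm

lemma innerA_fold (u : Int) : ∀ (ks : List Int) (l : List (Int × List Int)),
    (l.map Prod.fst).Nodup → ks.Nodup →
    ks.foldl (pvInnerStepA u) (PySem.Dict.mk l) =
      PySem.Dict.mk (l.map (fun p => if p.1 ∈ ks then (p.1, p.2.erase u) else p)) := by
  intro ks
  induction ks with
  | nil =>
    intro l hl _
    apply PySem.Dict.ext
    have hid : ∀ p ∈ l, (if p.1 ∈ ([] : List Int) then (p.1, p.2.erase u) else p) = p := by
      intro p _
      rw [if_neg (by simp)]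
    exact ((List.map_congr_left hid).trans (List.map_id l)).symm
  | cons k₀ ks' ih =>
    intro l hl hnd
    have hk0 : k₀ ∉ ks' := (List.nodup_cons.mp hnd).1
    have hnd' : ks'.Nodup := (List.nodup_cons.mp hnd).2
    simp only [List.foldl_cons]
    rw [innerStepA_mk u k₀ l hl]
    have hl' : ((l.map (fun p => if p.1 = k₀ then (p.1, p.2.erase u) else p)).map Prod.fst).Nodup := by
      rw [List.map_map]
      have he : (Prod.fst ∘ fun (p : Int × List Int) => if p.1 = k₀ then (p.1, p.2.erase u) else p)
          = Prod.fst := by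
        funext p
        by_cases h : p.1 = k₀ <;> simp [Function.comp, h]
      rw [he]
      exact hl
    rw [ih _ hl' hnd']
    apply PySem.Dict.ext
    show _ = _
    rw [List.map_map]
    have he : ((fun (p : Int × List Int) => if p.1 ∈ ks' then (p.1, p.2.erase u) else p) ∘
        fun (p : Int × List Int) => if p.1 = k₀ then (p.1, p.2.erase u) else p)
        = fun (p : Int × List Int) => if p.1 ∈ k₀ :: ks' then (p.1, p.2.erase u) else p := by
      funext p
      by_cases h1 : p.1 = k₀
      · simp [Function.comp, h1, hk0]
      · by_cases h2 : p.1 ∈ ks' <;> simp [Function.comp, h1, h2]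
    rw [he]

lemma innerA_strip (dl : List (Int × List Int)) (R : List Int) (u : Int)
    (hK : (dl.map Prod.fst).Nodup) :
    pvInnerA (PySem.Dict.mk (strip dl R (R ++ [u]))) u =
      PySem.Dict.mk (strip dl (R ++ [u]) (R ++ [u])) := by
  unfold pvInnerA
  have hkeys : PySem.Dict.keys (PySem.Dict.mk (strip dl R (R ++ [u])))
      = (dl.map Prod.fst).filter (fun k => !decide (k ∈ R ++ [u])) := keys_strip dl R (R ++ [u])
  have hmapfst : (strip dl R (R ++ [u])).map Prod.fst
      = (dl.map Prod.fst).filter (fun k => !decide (k ∈ R ++ [u])) := hkeys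
  have hsn : ((strip dl R (R ++ [u])).map Prod.fst).Nodup := by
    rw [hmapfst]
    exact hK.filter _
  rw [hkeys, innerA_fold u _ _ hsn (hK.filter _)]
  apply PySem.Dict.ext
  show (strip dl R (R ++ [u])).map _ = strip dl (R ++ [u]) (R ++ [u])
  have hmem : ∀ p ∈ strip dl R (R ++ [u]),
      (p : Int × List Int).1 ∈ (dl.map Prod.fst).filter (fun k => !decide (k ∈ R ++ [u])) := by
    intro p hp
    have h1 : p.1 ∈ (strip dl R (R ++ [u])).map Prod.fst := List.mem_map_of_mem hp
    rw [hmapfst] at h1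
    exact h1
  have h1 : (strip dl R (R ++ [u])).map
      (fun p => if p.1 ∈ (dl.map Prod.fst).filter (fun k => !decide (k ∈ R ++ [u]))
        then (p.1, p.2.erase u) else p)
      = (strip dl R (R ++ [u])).map (fun p => (p.1, p.2.erase u)) :=
    List.map_congr_left (fun p hp => by rw [if_pos (hmem p hp)])
  rw [h1]
  unfold strip
  rw [List.map_map]
  apply List.map_congr_left
  intro p _
  simp [Function.comp, List.foldl_append]

lemma roundA_go (dl : List (Int × List Int)) (hK : (dl.map Prod.fst).Nodup) :
    ∀ (ks R : List Int) (c : Nat), ks.Nodup →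
      (∀ k ∈ ks, k ∈ dl.map Prod.fst ∧ k ∉ R) → PeelFrom dl [] R →
      ∃ R', ks.foldl pvRoundStepA (c, PySem.Dict.mk (strip dl R R)) =
              (c + (R'.length - R.length), PySem.Dict.mk (strip dl R' R')) ∧
        PeelFrom dl [] R' ∧ R.length ≤ R'.length ∧
        (R'.length = R.length → R' = R ∧ ∀ k ∈ ks, degA dl R k ≠ 0) := by
  intro ks
  induction ks with
  | nil =>
    intro R c _ _ hpeel
    refine ⟨R, by simp, hpeel, le_refl _, fun _ => ⟨rfl, by simp⟩⟩
  | cons user ks' ih =>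
    intro R c hnd hmem hpeel
    have hnd' : ks'.Nodup := (List.nodup_cons.mp hnd).2
    have huks : user ∉ ks' := (List.nodup_cons.mp hnd).1
    obtain ⟨huK, huR⟩ := hmem user List.mem_cons_self
    have hRnd : R.Nodup := peel_nodup dl hpeel
    have hget : PySem.Dict.getD (PySem.Dict.mk (strip dl R R)) user []
        = R.foldl (fun acc v => acc.erase v) (adjD dl user) := getD_strip dl R R user huR
    have hlen : (R.foldl (fun acc v => acc.erase v) (adjD dl user)).length
        = (adjD dl user).length - R.countP (fun v => decide (v ∈ adjD dl user)) :=
      length_foldl_erase R _ hRnd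
    have hle := countP_mem_le (P := R) (adjD dl user) hRnd
    simp only [List.foldl_cons]
    by_cases hz : (R.foldl (fun acc v => acc.erase v) (adjD dl user)).length = 0
    · have hdeg : degA dl R user = 0 := by
        unfold degA
        omega
      have hstep : pvRoundStepA (c, PySem.Dict.mk (strip dl R R)) user
          = (c + 1, PySem.Dict.mk (strip dl (R ++ [user]) (R ++ [user]))) := by
        simp only [pvRoundStepA]
        rw [hget, if_pos (by simp [hz])]
        rw [erase_strip, innerA_strip dl R user hK]
      rw [hstep]
      have hpeel' : PeelFrom dl [] (R ++ [user]) :=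
        peelFrom_snoc dl R [] hpeel huK (by simpa using huR) (by simpa using hdeg)
      obtain ⟨R', hfold, hp', hlen', _⟩ := ih (R ++ [user]) (c + 1) hnd'
        (fun k hk => ⟨(hmem k (List.mem_cons_of_mem user hk)).1, by
          have h2 := (hmem k (List.mem_cons_of_mem user hk)).2
          intro hc
          rcases List.mem_append.mp hc with h | h
          · exact h2 h
          · simp only [List.mem_singleton] at h
            exact huks (h ▸ hk)⟩)
        hpeel'
      have hlapp : (R ++ [user]).length = R.length + 1 := by simp
      refine ⟨R', ?_, hp', by omega, fun heq => absurd heq (by omega)⟩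
      rw [hfold]
      have harith : c + 1 + (R'.length - (R ++ [user]).length) = c + (R'.length - R.length) := by
        omega
      rw [harith]
    · have hstep : pvRoundStepA (c, PySem.Dict.mk (strip dl R R)) user
          = (c, PySem.Dict.mk (strip dl R R)) := by
        simp only [pvRoundStepA]
        rw [hget, if_neg (by simp [hz])]
      rw [hstep]
      obtain ⟨R', hfold, hp', hlen', himp⟩ := ih R c hnd'
        (fun k hk => hmem k (List.mem_cons_of_mem user hk)) hpeel
      refine ⟨R', hfold, hp', hlen', ?_⟩
      intro heq
      obtain ⟨hRR, hall⟩ := himp heq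
      refine ⟨hRR, ?_⟩
      intro k hk
      rcases List.mem_cons.mp hk with rfl | hk'
      · unfold degA
        omega
      · exact hall k hk'

lemma loopA_strip (dl : List (Int × List Int)) (hK : (dl.map Prod.fst).Nodup) :
    ∀ (fuel : Nat) (R : List Int), PeelFrom dl [] R →
      (dl.map Prod.fst).length + 1 ≤ fuel + R.length →
      ∃ R', pvLoopA fuel (PySem.Dict.mk (strip dl R R)) = PySem.Dict.mk (strip dl R' R') ∧
        PeelFrom dl [] R' ∧ ClosedA dl R' := by
  intro fuel
  induction fuel with
  | zero =>
    intro R hpeel hfl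
    exfalso
    have h1 : R.length ≤ (dl.map Prod.fst).length :=
      (List.Nodup.subperm (peel_nodup dl hpeel) (peelFrom_subset dl R [] hpeel)).length_le
    omega
  | succ n ih =>
    intro R hpeel hfl
    obtain ⟨R', hfold, hp', hlen', himp⟩ := roundA_go dl hK
      ((dl.map Prod.fst).filter (fun k => !decide (k ∈ R))) R 0 (hK.filter _)
      (fun k hk => by
        simp only [List.mem_filter, Bool.not_eq_true', decide_eq_false_iff_not] at hk
        exact hk) hpeel
    have hround : pvRoundA (PySem.Dict.mk (strip dl R R))
        = (0 + (R'.length - R.length), PySem.Dict.mk (strip dl R' R')) := by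
      unfold pvRoundA
      rw [keys_strip dl R R]
      exact hfold
    have hstep : pvLoopA (n + 1) (PySem.Dict.mk (strip dl R R))
        = if 0 + (R'.length - R.length) > 0 then pvLoopA n (PySem.Dict.mk (strip dl R' R'))
          else PySem.Dict.mk (strip dl R' R') := by
      show (let cd := pvRoundA (PySem.Dict.mk (strip dl R R));
        if cd.1 > 0 then pvLoopA n cd.2 else cd.2) = _
      rw [hround]
    by_cases hgt : R'.length - R.length > 0
    · obtain ⟨R'', hres, hp'', hcl''⟩ := ih R' hp' (by omega)
      refine ⟨R'', ?_, hp'', hcl''⟩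
      rw [hstep, if_pos (by omega)]
      exact hres
    · have heq : R'.length = R.length := by omega
      obtain ⟨hRR, hall⟩ := himp heq
      subst hRR
      refine ⟨R', ?_, hp', ?_⟩
      · rw [hstep, if_neg (by omega)]
      · intro k hkK hkR
        exact hall k (by simp [List.mem_filter, hkK, hkR])

lemma strip_nil (dl : List (Int × List Int)) : strip dl [] [] = dl := by
  show (dl.filter _).map _ = dl
  rw [List.filter_eq_self.mpr (by intro a _; simp)]
  have hid : ∀ p ∈ dl, ((p : Int × List Int).1,
      List.foldl (fun acc v => acc.erase v) p.2 []) = p := by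
    intro p _
    rfl
  exact (List.map_congr_left hid).trans (List.map_id dl)

lemma A_char (dl : List (Int × List Int)) (hK : (dl.map Prod.fst).Nodup) :
    ∃ R, remove_unconnected_nodes dl =
        (dl.map Prod.fst).filter (fun k => !decide (k ∈ R)) ∧
      PeelFrom dl [] R ∧ ClosedA dl R := by
  obtain ⟨R, hres, hp, hcl⟩ := loopA_strip dl hK (dl.length + 1) []
    (by simp only [PeelFrom]) (by simp)
  refine ⟨R, ?_, hp, hcl⟩
  unfold remove_unconnected_nodes
  rw [show PySem.Dict.mk dl = PySem.Dict.mk (strip dl [] []) from by rw [strip_nil]]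
  rw [hres, keys_strip]

-- ---- B: init characterization ----

def degOf (dl : List (Int × List Int)) : PySem.Dict Int Int :=
  dl.foldl (fun d p => PySem.Dict.insert d p.1 (p.2.length : Int)) (PySem.Dict.mk [])

def revOf (dl : List (Int × List Int)) : PySem.Dict Int (List Int) :=
  dl.foldl (fun r p => (PySem.Set.ofList p.2).foldl (pvRevStepB p.1) r) (PySem.Dict.mk [])

-- the keys whose adjacency list contains u, in input order
def revL (dl : List (Int × List Int)) (u : Int) : List Int :=
  (dl.filter (fun p => decide (u ∈ p.2))).map Prod.fst

lemma pvInitB_eq (dl : List (Int × List Int)) : pvInitB dl = (degOf dl, revOf dl) := by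
  suffices h : ∀ (l : List (Int × List Int)) (a : PySem.Dict Int Int)
      (b : PySem.Dict Int (List Int)),
      l.foldl pvInitStepB (a, b)
        = (l.foldl (fun d p => PySem.Dict.insert d p.1 (p.2.length : Int)) a,
           l.foldl (fun r p => (PySem.Set.ofList p.2).foldl (pvRevStepB p.1) r) b) by
    exact h dl _ _
  intro l
  induction l with
  | nil => intro a b; rfl
  | cons p tl ih =>
    intro a b
    simp only [List.foldl_cons, pvInitStepB]
    exact ih _ _

lemma getD_foldl_ins_not_mem : ∀ (l : List (Int × List Int)) (d : PySem.Dict Int Int) (k : Int),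
    k ∉ l.map Prod.fst →
    PySem.Dict.getD (l.foldl (fun d p => PySem.Dict.insert d p.1 (p.2.length : Int)) d) k 0
      = PySem.Dict.getD d k 0 := by
  intro l
  induction l with
  | nil => intro d k _; rfl
  | cons p tl ih =>
    intro d k hk
    simp only [List.foldl_cons]
    rw [ih _ k (fun h => hk (List.mem_cons_of_mem _ h))]
    have hne : k ≠ p.1 := fun e => hk (by simp [e])
    rw [PySem.Dict.getD_insert, if_neg hne]

lemma getD_degOf (dl : List (Int × List Int)) (hK : (dl.map Prod.fst).Nodup) (k : Int)
    (hk : k ∈ dl.map Prod.fst) :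
    PySem.Dict.getD (degOf dl) k 0 = ((adjD dl k).length : Int) := by
  suffices h : ∀ (l : List (Int × List Int)) (d : PySem.Dict Int Int) (k : Int),
      (l.map Prod.fst).Nodup → k ∈ l.map Prod.fst →
      PySem.Dict.getD (l.foldl (fun d p => PySem.Dict.insert d p.1 (p.2.length : Int)) d) k 0
        = ((adjD l k).length : Int) by
    exact h dl _ k hK hk
  intro l
  induction l with
  | nil => intro d k _ hk; simp at hk
  | cons p tl ih =>
    intro d k hnd hkm
    obtain ⟨a, x⟩ := p
    simp only [List.foldl_cons]
    rw [adjD_cons]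
    by_cases he : a = k
    · have hknt : k ∉ tl.map Prod.fst := by
        have := (List.nodup_cons.mp hnd).1
        exact fun h => this (he ▸ h)
      rw [getD_foldl_ins_not_mem tl _ k hknt]
      rw [PySem.Dict.getD_insert, if_pos he.symm, if_pos he]
    · rw [if_neg he]
      refine ih _ k (List.nodup_cons.mp hnd).2 ?_
      rcases List.mem_cons.mp hkm with h | h
      · exact absurd h.symm he
      · exact h

lemma getD_revfold_not_mem (u : Int) :
    ∀ (s : List Int) (r : PySem.Dict Int (List Int)) (w : Int), w ∉ s →
      PySem.Dict.getD (s.foldl (pvRevStepB u) r) w [] = PySem.Dict.getD r w [] := by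
  intro s
  induction s with
  | nil => intro r w _; rfl
  | cons v s ih =>
    intro r w hw
    simp only [List.foldl_cons]
    rw [ih _ w (fun h => hw (List.mem_cons_of_mem v h))]
    have hne : w ≠ v := fun e => hw (e ▸ List.mem_cons_self)
    simp only [pvRevStepB]
    rw [PySem.Dict.getD_insert, if_neg hne]

lemma getD_revfold (u : Int) :
    ∀ (s : List Int) (r : PySem.Dict Int (List Int)) (w : Int), s.Nodup →
      PySem.Dict.getD (s.foldl (pvRevStepB u) r) w []
        = PySem.Dict.getD r w [] ++ (if w ∈ s then [u] else []) := by
  intro s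
  induction s with
  | nil => intro r w _; simp
  | cons v s ih =>
    intro r w hnd
    simp only [List.foldl_cons]
    by_cases hwv : w = v
    · subst hwv
      have hws : w ∉ s := (List.nodup_cons.mp hnd).1
      rw [getD_revfold_not_mem u s _ w hws]
      simp only [pvRevStepB]
      rw [PySem.Dict.getD_insert, if_pos rfl]
      simp
    · rw [ih _ w (List.nodup_cons.mp hnd).2]
      simp only [pvRevStepB]
      rw [PySem.Dict.getD_insert, if_neg hwv]
      simp [List.mem_cons, hwv]

lemma getD_revOf (dl : List (Int × List Int)) (w : Int) :
    PySem.Dict.getD (revOf dl) w [] = revL dl w := by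
  suffices h : ∀ (l : List (Int × List Int)) (r : PySem.Dict Int (List Int)),
      PySem.Dict.getD (l.foldl (fun r p => (PySem.Set.ofList p.2).foldl (pvRevStepB p.1) r) r) w []
        = PySem.Dict.getD r w [] ++ (l.filter (fun p => decide (w ∈ p.2))).map Prod.fst by
    have h2 := h dl (PySem.Dict.mk [])
    unfold revOf revL
    rw [h2]
    rfl
  intro l
  induction l with
  | nil => intro r; simp
  | cons p tl ih =>
    intro r
    simp only [List.foldl_cons]
    rw [ih, getD_revfold p.1 (PySem.Set.ofList p.2) r w (PySem.Set.nodup_ofList _)]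
    by_cases hw : w ∈ p.2
    · rw [if_pos ((PySem.Set.mem_ofList _ _).mpr hw)]
      rw [List.filter_cons, if_pos (by simpa using hw)]
      simp
    · rw [if_neg (fun h => hw ((PySem.Set.mem_ofList _ _).mp h))]
      rw [List.filter_cons, if_neg (by simpa using hw)]
      simp

lemma revL_nodup (dl : List (Int × List Int)) (hK : (dl.map Prod.fst).Nodup) (u : Int) :
    (revL dl u).Nodup := by
  exact List.Nodup.sublist (List.Sublist.map Prod.fst List.filter_sublist) hK

lemma mem_revL (dl : List (Int × List Int)) (hK : (dl.map Prod.fst).Nodup) (u k : Int) :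
    k ∈ revL dl u ↔ k ∈ dl.map Prod.fst ∧ u ∈ adjD dl k := by
  have hadj : ∀ p ∈ dl, adjD dl (p : Int × List Int).1 = p.2 := by
    intro p hp
    show PySem.Dict.getD (PySem.Dict.mk dl) p.1 [] = p.2
    have hg := PySem.Dict.get?_of_mem_items (d := PySem.Dict.mk dl)
      (show (p.1, p.2) ∈ dl from hp) hK
    simp [PySem.Dict.getD, hg]
  constructor
  · intro h
    obtain ⟨p, hp, hfst⟩ := List.mem_map.mp h
    have hpf := List.mem_filter.mp hp
    refine ⟨hfst ▸ List.mem_map_of_mem hpf.1, ?_⟩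
    rw [← hfst, hadj p hpf.1]
    simpa using hpf.2
  · rintro ⟨hkK, hu⟩
    obtain ⟨p, hp, hfst⟩ := List.mem_map.mp hkK
    refine List.mem_map.mpr ⟨p, List.mem_filter.mpr ⟨hp, ?_⟩, hfst⟩
    have : u ∈ p.2 := by
      rw [← hadj p hp, hfst]
      exact hu
    simpa using this

lemma foldl_add_fresh : ∀ (s acc : List Int), s.Nodup → (∀ x ∈ s, x ∉ acc) →
    s.foldl PySem.Set.add acc = acc ++ s := by
  intro s
  induction s with
  | nil => intro acc _ _; simp
  | cons x s ih =>
    intro acc hnd hfr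
    simp only [List.foldl_cons]
    have hx : x ∉ acc := hfr x List.mem_cons_self
    have hadd : PySem.Set.add acc x = acc ++ [x] := by
      simp only [PySem.Set.add]
      rw [if_neg (by simpa using hx)]
    rw [hadd, ih (acc ++ [x]) (List.nodup_cons.mp hnd).2 ?_]
    · simp
    · intro y hy hmem
      rcases List.mem_append.mp hmem with h | h
      · exact hfr y (List.mem_cons_of_mem x hy) h
      · simp only [List.mem_singleton] at h
        exact (List.nodup_cons.mp hnd).1 (h ▸ hy)

lemma ofList_eq_self {s : List Int} (h : s.Nodup) : PySem.Set.ofList s = s := by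
  show s.foldl PySem.Set.add PySem.Set.empty = s
  rw [foldl_add_fresh s PySem.Set.empty h (by intro x _ hx; simp [PySem.Set.empty] at hx)]
  rfl

lemma peel_of_all_zero (dl : List (Int × List Int)) :
    ∀ (s pre : List Int), pre.Nodup → s.Nodup →
      (∀ x ∈ s, x ∈ dl.map Prod.fst ∧ degA dl [] x = 0 ∧ x ∉ pre) → PeelFrom dl pre s := by
  intro s
  induction s with
  | nil => intro pre _ _ _; exact trivial
  | cons x s ih =>
    intro pre hpre hnd hall
    obtain ⟨hxK, hx0, hxpre⟩ := hall x List.mem_cons_self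
    have hdeg : degA dl pre x = 0 := by
      have h1 : degA dl pre x ≤ degA dl [] x :=
        degA_mono dl x List.nodup_nil (by simp)
      have h2 : 0 ≤ degA dl pre x := degA_nonneg dl x hpre
      omega
    have hpre' : (pre ++ [x]).Nodup := by
      rw [List.nodup_append]
      refine ⟨hpre, List.nodup_singleton x, ?_⟩
      intro a ha b hb e
      have hb' : b = x := by simpa using hb
      exact hxpre ((e.trans hb') ▸ ha)
    refine ⟨hxK, hxpre, hdeg, ih (pre ++ [x]) hpre' (List.nodup_cons.mp hnd).2 ?_⟩
    intro y hy
    obtain ⟨hyK, hy0, hypre⟩ := hall y (List.mem_cons_of_mem x hy)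
    refine ⟨hyK, hy0, ?_⟩
    intro hc
    rcases List.mem_append.mp hc with h | h
    · exact hypre h
    · simp only [List.mem_singleton] at h
      exact (List.nodup_cons.mp hnd).1 (h ▸ hy)

-- ---- B: the peel loop ----

lemma peelB_inner (dl : List (Int × List Int)) (hK : (dl.map Prod.fst).Nodup) (u : Int) (P : List Int)
    (hP : P.Nodup) (huP : u ∉ P) :
    ∀ (ns₂ : List Int) (deg₁ : PySem.Dict Int Int) (s₁ r₁ : List Int), ns₂.Nodup →
      (∀ k ∈ ns₂, k ∈ revL dl u) →
      PeelFrom dl [] r₁ → s₁.Nodup → (∀ x ∈ s₁, x ∈ r₁) → u ∈ r₁ → u ∉ s₁ →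
      (∀ x ∈ P, x ∈ r₁) → (∀ x ∈ s₁, x ∉ P ++ [u]) → (∀ x ∈ r₁, x ∈ P ++ [u] ∨ x ∈ s₁) →
      (∀ k ∈ dl.map Prod.fst, k ∉ r₁ →
        (k ∈ ns₂ → PySem.Dict.getD deg₁ k 0 = degA dl P k ∧ degA dl P k ≠ 0) ∧
        (k ∉ ns₂ → PySem.Dict.getD deg₁ k 0 = degA dl (P ++ [u]) k ∧ degA dl (P ++ [u]) k ≠ 0)) →
      ∃ deg₂ s₂ r₂ m, ns₂.foldl pvPeelStepB (deg₁, s₁, r₁) = (deg₂, s₂, r₂) ∧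
        PeelFrom dl [] r₂ ∧ s₂.Nodup ∧ (∀ x ∈ s₂, x ∈ r₂) ∧ u ∈ r₂ ∧ u ∉ s₂ ∧
        (∀ x ∈ P, x ∈ r₂) ∧ (∀ x ∈ s₂, x ∉ P ++ [u]) ∧ (∀ x ∈ r₂, x ∈ P ++ [u] ∨ x ∈ s₂) ∧
        (∀ k ∈ dl.map Prod.fst, k ∉ r₂ →
          PySem.Dict.getD deg₂ k 0 = degA dl (P ++ [u]) k ∧ degA dl (P ++ [u]) k ≠ 0) ∧
        (∀ x ∈ r₁, x ∈ r₂) ∧ r₂.length = r₁.length + m ∧ s₂.length = s₁.length + m := by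
  intro ns₂
  induction ns₂ with
  | nil =>
    intro deg₁ s₁ r₁ _ _ hpeel hsnd hsr hur hus hPr hsPu hrPu hdegf
    refine ⟨deg₁, s₁, r₁, 0, rfl, hpeel, hsnd, hsr, hur, hus, hPr, hsPu, hrPu, ?_,
      fun x hx => hx, by omega, by omega⟩
    intro k hkK hkr
    exact (hdegf k hkK hkr).2 (by simp)
  | cons k₀ ns₂' ih =>
    intro deg₁ s₁ r₁ hnd hns hpeel hsnd hsr hur hus hPr hsPu hrPu hdegf
    have hnd' : ns₂'.Nodup := (List.nodup_cons.mp hnd).2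
    have hk0ns : k₀ ∉ ns₂' := (List.nodup_cons.mp hnd).1
    have hr₁nd : r₁.Nodup := peel_nodup dl hpeel
    have hPund : (P ++ [u]).Nodup := by
      rw [List.nodup_append]
      refine ⟨hP, List.nodup_singleton u, ?_⟩
      intro a ha b hb e
      have hb' : b = u := by simpa using hb
      exact huP ((e.trans hb') ▸ ha)
    simp only [List.foldl_cons]
    by_cases hk0r : k₀ ∈ r₁
    · have hstep : pvPeelStepB (deg₁, s₁, r₁) k₀ = (deg₁, s₁, r₁) := by
        simp only [pvPeelStepB]
        rw [if_pos (by simpa using hk0r)]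
      rw [hstep]
      apply ih deg₁ s₁ r₁ hnd' (fun k hk => hns k (List.mem_cons_of_mem _ hk)) hpeel hsnd hsr
        hur hus hPr hsPu hrPu
      intro k hkK hkr
      refine ⟨fun hk => (hdegf k hkK hkr).1 (List.mem_cons_of_mem _ hk), fun hk => ?_⟩
      by_cases hkk0 : k = k₀
      · exact absurd (hkk0 ▸ hk0r) hkr
      · refine (hdegf k hkK hkr).2 (fun hc => ?_)
        rcases List.mem_cons.mp hc with h | h
        · exact hkk0 h
        · exact hk h
    · obtain ⟨hk0K, hk0adj⟩ := (mem_revL dl hK u k₀).mp (hns k₀ List.mem_cons_self)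
      obtain ⟨hgd, hgdne⟩ := (hdegf k₀ hk0K hk0r).1 List.mem_cons_self
      have hPu : degA dl (P ++ [u]) k₀ = degA dl P k₀ - 1 := by
        unfold degA
        rw [List.countP_append]
        have h1 : List.countP (fun v => decide (v ∈ adjD dl k₀)) [u] = 1 := by simp [hk0adj]
        rw [h1]
        push_cast
        ring
      have hdv : PySem.Dict.getD (PySem.Dict.modify deg₁ k₀ 0 (· - 1)) k₀ 0
          = degA dl P k₀ - 1 := by
        rw [PySem.Dict.getD_modify_self, hgd]
      have hk0s₁ : k₀ ∉ s₁ := fun h => hk0r (hsr k₀ h)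
      by_cases hz : degA dl P k₀ - 1 = 0
      · have hstep : pvPeelStepB (deg₁, s₁, r₁) k₀
            = (PySem.Dict.modify deg₁ k₀ 0 (· - 1), k₀ :: s₁, r₁ ++ [k₀]) := by
          simp only [pvPeelStepB]
          rw [if_neg (by simpa using hk0r)]
          rw [hdv, if_pos (by simp [hz])]
          simp only [PySem.Set.add]
          rw [if_neg (by simpa using hk0r)]
        rw [hstep]
        have hk0Pu : k₀ ∉ P ++ [u] := fun h => by
          rcases List.mem_append.mp h with h | h
          · exact hk0r (hPr k₀ h)
          · simp only [List.mem_singleton] at h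
            exact hk0r (h ▸ hur)
        have hpeel₂ : PeelFrom dl [] (r₁ ++ [k₀]) := by
          apply peelFrom_snoc dl r₁ [] hpeel hk0K (by simpa using hk0r)
          have hm : degA dl r₁ k₀ ≤ degA dl (P ++ [u]) k₀ := by
            apply degA_mono dl k₀ hPund ?_ 
            intro x hx
            rcases List.mem_append.mp hx with h | h
            · exact hPr x h
            · simp only [List.mem_singleton] at h
              exact h ▸ hur
          have hnn : 0 ≤ degA dl r₁ k₀ := degA_nonneg dl k₀ hr₁nd
          have hz2 : degA dl (P ++ [u]) k₀ = 0 := by rw [hPu]; exact hz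
          have : degA dl r₁ k₀ = 0 := by omega
          simpa using this
        obtain ⟨deg₂, s₂, r₂, m, hfold, hp₂, hs₂nd, hs₂r, hur₂, hus₂, hPr₂, hs₂Pu, hr₂Pu,
            hdegf₂, hsub₂, hlr, hls⟩ := ih (PySem.Dict.modify deg₁ k₀ 0 (· - 1)) (k₀ :: s₁)
          (r₁ ++ [k₀]) hnd' (fun k hk => hns k (List.mem_cons_of_mem _ hk)) hpeel₂
          (List.nodup_cons.mpr ⟨hk0s₁, hsnd⟩)
          (by
            intro x hx
            rcases List.mem_cons.mp hx with rfl | hx'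
            · exact List.mem_append_right _ List.mem_cons_self
            · exact List.mem_append_left _ (hsr x hx'))
          (List.mem_append_left _ hur)
          (by
            intro hc
            rcases List.mem_cons.mp hc with h | h
            · exact hk0r (h ▸ hur)
            · exact hus h)
          (fun x hx => List.mem_append_left _ (hPr x hx))
          (by
            intro x hx
            rcases List.mem_cons.mp hx with rfl | hx'
            · exact hk0Pu
            · exact hsPu x hx')
          (by
            intro x hx
            rcases List.mem_append.mp hx with h | h
            · rcases hrPu x h with h2 | h2
              · exact Or.inl h2
              · exact Or.inr (List.mem_cons_of_mem _ h2)
            · simp only [List.mem_singleton] at h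
              exact Or.inr (h ▸ List.mem_cons_self))
          (by
            intro k hkK₂ hkr₂
            have hkr₁ : k ∉ r₁ := fun h => hkr₂ (List.mem_append_left _ h)
            have hkk0 : k ≠ k₀ := fun e => hkr₂ (List.mem_append_right _ (by simp [e]))
            have hgmod : PySem.Dict.getD (PySem.Dict.modify deg₁ k₀ 0 (· - 1)) k 0
                = PySem.Dict.getD deg₁ k 0 := by
              rw [PySem.Dict.getD_modify, if_neg hkk0]
            refine ⟨fun hk => ?_, fun hk => ?_⟩
            · rw [hgmod]
              exact (hdegf k hkK₂ hkr₁).1 (List.mem_cons_of_mem _ hk)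
            · rw [hgmod]
              refine (hdegf k hkK₂ hkr₁).2 (fun hc => ?_)
              rcases List.mem_cons.mp hc with h | h
              · exact hkk0 h
              · exact hk h)
        refine ⟨deg₂, s₂, r₂, m + 1, hfold, hp₂, hs₂nd, hs₂r, hur₂, hus₂, hPr₂, hs₂Pu, hr₂Pu,
          hdegf₂, fun x hx => hsub₂ x (List.mem_append_left _ hx), ?_, ?_⟩
        · simp only [List.length_append, List.length_singleton] at hlr
          omega
        · simp only [List.length_cons] at hls
          omega
      · have hstep : pvPeelStepB (deg₁, s₁, r₁) k₀
            = (PySem.Dict.modify deg₁ k₀ 0 (· - 1), s₁, r₁) := by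
          simp only [pvPeelStepB]
          rw [if_neg (by simpa using hk0r)]
          rw [hdv, if_neg (by simp [hz])]
        rw [hstep]
        apply ih (PySem.Dict.modify deg₁ k₀ 0 (· - 1)) s₁ r₁ hnd'
          (fun k hk => hns k (List.mem_cons_of_mem _ hk)) hpeel hsnd hsr hur hus hPr hsPu hrPu
        intro k hkK hkr
        by_cases hkk0 : k = k₀
        · subst hkk0
          refine ⟨fun hk => absurd hk hk0ns, fun _ => ⟨?_, ?_⟩⟩
          · exact hdv.trans hPu.symm
          · rw [hPu]
            exact hz
        · have hgmod : PySem.Dict.getD (PySem.Dict.modify deg₁ k₀ 0 (· - 1)) k 0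
              = PySem.Dict.getD deg₁ k 0 := by
            rw [PySem.Dict.getD_modify, if_neg hkk0]
          refine ⟨fun hk => ?_, fun hk => ?_⟩
          · rw [hgmod]
            exact (hdegf k hkK hkr).1 (List.mem_cons_of_mem _ hk)
          · rw [hgmod]
            refine (hdegf k hkK hkr).2 (fun hc => ?_)
            rcases List.mem_cons.mp hc with h | h
            · exact hkk0 h
            · exact hk h

lemma peelB_go (dl : List (Int × List Int)) (hK : (dl.map Prod.fst).Nodup) :
    ∀ (fuel : Nat) (deg : PySem.Dict Int Int) (s r P : List Int),
      PeelFrom dl [] r → s.Nodup → (∀ x ∈ s, x ∈ r) →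
      P.Nodup → (∀ x ∈ P, x ∈ r) → (∀ x ∈ s, x ∉ P) → (∀ x ∈ r, x ∈ P ∨ x ∈ s) →
      (∀ k ∈ dl.map Prod.fst, k ∉ r →
        PySem.Dict.getD deg k 0 = degA dl P k ∧ degA dl P k ≠ 0) →
      s.length + ((dl.map Prod.fst).length - r.length) ≤ fuel →
      ∃ r', pvPeelB fuel deg (revOf dl) s r = r' ∧
        PeelFrom dl [] r' ∧ ClosedA dl r' := by
  intro fuel
  induction fuel with
  | zero =>
    intro deg s r P hpeel hsnd hsr hPnd hPr hsP hrPs hdegf hfl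
    have hs0 : s = [] := List.eq_nil_of_length_eq_zero (by omega)
    subst hs0
    refine ⟨r, rfl, hpeel, ?_⟩
    intro k hkK hkr
    have hcg : degA dl r k = degA dl P k := degA_congr dl k (peel_nodup dl hpeel) hPnd
      (fun x => ⟨fun hx => (hrPs x hx).resolve_right (by simp), fun hx => hPr x hx⟩)
    rw [hcg]
    exact (hdegf k hkK hkr).2
  | succ n ih =>
    intro deg s r P hpeel hsnd hsr hPnd hPr hsP hrPs hdegf hfl
    cases s with
    | nil =>
      refine ⟨r, rfl, hpeel, ?_⟩
      intro k hkK hkr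
      have hcg : degA dl r k = degA dl P k := degA_congr dl k (peel_nodup dl hpeel) hPnd
        (fun x => ⟨fun hx => (hrPs x hx).resolve_right (by simp), fun hx => hPr x hx⟩)
      rw [hcg]
      exact (hdegf k hkK hkr).2
    | cons u s' =>
      have hu_r : u ∈ r := hsr u List.mem_cons_self
      have hu_s' : u ∉ s' := (List.nodup_cons.mp hsnd).1
      have hu_P : u ∉ P := hsP u List.mem_cons_self
      obtain ⟨deg₂, s₂, r₂, m, hfold, hp₂, hs₂nd, hs₂r, hur₂, hus₂, hPr₂, hs₂Pu, hr₂Pu,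
          hdegf₂, hsub₂, hlr, hls⟩ :=
        peelB_inner dl hK u P hPnd hu_P (revL dl u) deg s' r (revL_nodup dl hK u)
          (fun k hk => hk) hpeel (List.nodup_cons.mp hsnd).2
          (fun x hx => hsr x (List.mem_cons_of_mem _ hx)) hu_r hu_s' hPr
          (by
            intro x hx hc
            rcases List.mem_append.mp hc with h | h
            · exact hsP x (List.mem_cons_of_mem _ hx) h
            · simp only [List.mem_singleton] at h
              exact hu_s' (h ▸ hx))
          (by
            intro x hx
            rcases hrPs x hx with h | h
            · exact Or.inl (List.mem_append_left _ h)
            · rcases List.mem_cons.mp h with rfl | h2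
              · exact Or.inl (List.mem_append_right _ List.mem_cons_self)
              · exact Or.inr h2)
          (by
            intro k hkK hkr
            constructor
            · intro _
              exact hdegf k hkK hkr
            · intro hknr
              have hukadj : u ∉ adjD dl k := fun hu2 =>
                hknr ((mem_revL dl hK u k).mpr ⟨hkK, hu2⟩)
              have he : degA dl (P ++ [u]) k = degA dl P k := by
                unfold degA
                rw [List.countP_append]
                have h1 : List.countP (fun v => decide (v ∈ adjD dl k)) [u] = 0 := by
                  simp [hukadj]
                rw [h1]
                simp
              rw [he]
              exact hdegf k hkK hkr)
      have hunf : pvPeelB (n + 1) deg (revOf dl) (u :: s') r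
          = pvPeelB n deg₂ (revOf dl) s₂ r₂ := by
        show (let st := (PySem.Dict.getD (revOf dl) u []).foldl pvPeelStepB (deg, s', r);
          pvPeelB n st.1 (revOf dl) st.2.1 st.2.2) = _
        rw [getD_revOf dl u, hfold]
      have hr₂K : ∀ x ∈ r₂, x ∈ dl.map Prod.fst := peelFrom_subset dl r₂ [] hp₂
      have hr₂len : r₂.length ≤ (dl.map Prod.fst).length :=
        (List.Nodup.subperm (peel_nodup dl hp₂) hr₂K).length_le
      obtain ⟨r', hres, hp', hcl'⟩ := ih deg₂ s₂ r₂ (P ++ [u]) hp₂ hs₂nd hs₂r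
        (by
          rw [List.nodup_append]
          refine ⟨hPnd, List.nodup_singleton u, ?_⟩
          intro a ha b hb e
          have hb' : b = u := by simpa using hb
          exact hu_P ((e.trans hb') ▸ ha))
        (by
          intro x hx
          rcases List.mem_append.mp hx with h | h
          · exact hPr₂ x h
          · simp only [List.mem_singleton] at h
            exact h ▸ hur₂)
        hs₂Pu hr₂Pu hdegf₂
        (by
          simp only [List.length_cons] at hfl
          omega)
      exact ⟨r', hunf.trans hres, hp', hcl'⟩

lemma B_char (dl : List (Int × List Int)) (hK : (dl.map Prod.fst).Nodup) :
    ∃ R, remove_unconnected_nodes_alt dl =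
        (dl.map Prod.fst).filter (fun u => !(R.contains u)) ∧
      PeelFrom dl [] R ∧ ClosedA dl R := by
  have halt : remove_unconnected_nodes_alt dl
      = (dl.map Prod.fst).filter (fun u =>
          !((pvPeelB (dl.length + 1) (degOf dl) (revOf dl)
            (((dl.map Prod.fst).filter
              (fun u => PySem.Dict.getD (degOf dl) u 0 == 0)).reverse)
            (PySem.Set.ofList ((dl.map Prod.fst).filter
              (fun u => PySem.Dict.getD (degOf dl) u 0 == 0)))).contains u)) := by
    simp only [remove_unconnected_nodes_alt, pvInitB_eq]
  set seeds := (dl.map Prod.fst).filter (fun u => PySem.Dict.getD (degOf dl) u 0 == 0)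
    with hseeds
  have hseedsnd : seeds.Nodup := hK.filter _
  have hmemseeds : ∀ x, x ∈ seeds ↔ x ∈ dl.map Prod.fst ∧ degA dl [] x = 0 := by
    intro x
    constructor
    · intro hx
      have h2 := List.mem_filter.mp hx
      refine ⟨h2.1, ?_⟩
      have h3 := h2.2
      rw [getD_degOf dl hK x h2.1] at h3
      have h4 : ((adjD dl x).length : Int) = 0 := by simpa using h3
      unfold degA
      rw [List.countP_nil]
      omega
    · rintro ⟨hxK, hx0⟩
      apply List.mem_filter.mpr
      refine ⟨hxK, ?_⟩
      rw [getD_degOf dl hK x hxK]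
      have h4 : ((adjD dl x).length : Int) = 0 := by
        unfold degA at hx0
        rw [List.countP_nil] at hx0
        omega
      simpa using h4
  have hpeelseeds : PeelFrom dl [] seeds := peel_of_all_zero dl seeds [] List.nodup_nil hseedsnd
    (fun x hx => ⟨((hmemseeds x).mp hx).1, ((hmemseeds x).mp hx).2, by simp⟩)
  have hofl : PySem.Set.ofList seeds = seeds := ofList_eq_self hseedsnd
  have hdegf0 : ∀ k ∈ dl.map Prod.fst, k ∉ seeds →
      PySem.Dict.getD (degOf dl) k 0 = degA dl [] k ∧ degA dl [] k ≠ 0 := by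
    intro k hkK hks
    have hg := getD_degOf dl hK k hkK
    have hd : degA dl [] k = ((adjD dl k).length : Int) := by
      unfold degA
      rw [List.countP_nil]
      omega
    constructor
    · rw [hg, hd]
    · rw [hd]
      intro h0
      exact hks ((hmemseeds k).mpr ⟨hkK, by rw [hd]; exact h0⟩)
  have hfuel : seeds.reverse.length + ((dl.map Prod.fst).length - seeds.length)
      ≤ dl.length + 1 := by
    have h1 : seeds.length ≤ (dl.map Prod.fst).length := by
      rw [hseeds]
      exact List.length_filter_le _ _
    have h2 : (dl.map Prod.fst).length = dl.length := by simp
    simp only [List.length_reverse]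
    omega
  obtain ⟨r', hres, hp', hcl'⟩ := peelB_go dl hK (dl.length + 1) (degOf dl) seeds.reverse seeds []
    hpeelseeds (List.nodup_reverse.mpr hseedsnd) (fun x hx => List.mem_reverse.mp hx)
    List.nodup_nil (by simp) (by simp) (fun x hx => Or.inr (List.mem_reverse.mpr hx))
    (fun k hkK hkr => hdegf0 k hkK hkr) hfuel
  rw [hofl, hres] at halt
  exact ⟨r', halt, hp', hcl'⟩

-- ===== VERDICT (by name: the statement is the Claim_ definition above) =====
theorem remove_unconnected_nodes_spec : Claim_equal_remove_unconnected_nodes := by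
  intro dl _hdom hpre
  unfold Spec_remove_unconnected_nodes
  obtain ⟨RA, hAeq, hApeel, hAcl⟩ := A_char dl hpre
  obtain ⟨RB, hBeq, hBpeel, hBcl⟩ := B_char dl hpre
  have hmem : ∀ x, x ∈ RA ↔ x ∈ RB := by
    intro x
    constructor
    · exact fun hx => peel_subset_closed dl (peel_nodup dl hBpeel) hBcl RA [] hApeel
        (List.nodup_nil) (by simp) x hx
    · exact fun hx => peel_subset_closed dl (peel_nodup dl hApeel) hAcl RB [] hBpeel
        (List.nodup_nil) (by simp) x hx
  rw [hAeq, hBeq]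
  apply List.filter_congr
  intro u _
  simp [hmem u]
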